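-- pv_equiv track=rewrite | github.com/alirza13/Akari-Constraint-Satisfaction-Problem | CSP.py | blackInBetweenX
-- ===== SOURCE A (Python) =====
-- graph = [ ['Y', 'Y', 'Y', 'Y', 'X', 'Y', 'Y'],  # 7X7 Hard
--           ['Y', '2', 'Y', 'Y', 'Y', '0', 'Y'],
--           ['1', 'Y', 'Y', 'Y', 'Y', 'Y', 'Y'],
--           ['Y', 'Y', 'Y', '2', 'Y', 'Y', 'Y'],
--           ['Y', 'Y', 'Y', 'Y', 'Y', 'Y', '2'],
--           ['Y', '2', 'Y', 'Y', 'Y', '3', 'Y'],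
--           ['Y', 'Y', 'X', 'Y', 'Y', 'Y', 'Y']
--         ]
--
-- def blackInBetweenX (x):   # Check for sector in rows
--     sectors = []
--     startingPos = 0
--     y = 0
--     while y < len(graph[0]):
--         if graph[x][y] != 'Y':
--             startingPos = startingPos + 1
--             y = y + 1
--         else:
--             break
--     while y < len(graph[0]):
--         if graph[x][y] != 'Y':
--             sectors.append([startingPos,y - 1])
--             if y + 1 < len (graph[0]) and  graph[x][y + 1] == 'Y':
--                 startingPos = y + 1
--                 y = y + 1
--             else:
--                 while y < len(graph[0]) and graph [x][y] != 'Y':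
--                     y = y + 1
--                 startingPos = y
--
--         elif (y == len(graph[0]) - 1 and graph [x][y] == 'Y'):
--                 sectors.append([startingPos,y])
--                 break
--         else:
--             y = y + 1
--     return sectors
-- ===== SOURCE B (Python) =====
-- graph = [ ['Y', 'Y', 'Y', 'Y', 'X', 'Y', 'Y'],  # 7X7 Hard
--           ['Y', '2', 'Y', 'Y', 'Y', '0', 'Y'],
--           ['1', 'Y', 'Y', 'Y', 'Y', 'Y', 'Y'],
--           ['Y', 'Y', 'Y', '2', 'Y', 'Y', 'Y'],
--           ['Y', 'Y', 'Y', 'Y', 'Y', 'Y', '2'],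
--           ['Y', '2', 'Y', 'Y', 'Y', '3', 'Y'],
--           ['Y', 'Y', 'X', 'Y', 'Y', 'Y', 'Y']
--         ]
--
-- def blackInBetweenX(x):
--     # single-pass run detector: 'start' is the left end of the current Y-run, or None
--     sectors = []
--     start = None
--     for y in range(len(graph[0])):
--         if graph[x][y] == 'Y':
--             if start is None:
--                 start = y
--         elif start is not None:
--             sectors.append([start, y - 1])
--             start = None
--     if start is not None:
--         sectors.append([start, len(graph[0]) - 1])
--     return sectors
-- ===== Notes on version B (the rewrite author's own statement) =====
-- stated objective: simpler
-- what changed: Replaced A's leading-skip loop, startingPos pointer, lookahead branch and nested inner while loops with one single-pass run detector keeping an optional 'start of current Y-run' flag plus a final flush.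
import Mathlib
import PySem

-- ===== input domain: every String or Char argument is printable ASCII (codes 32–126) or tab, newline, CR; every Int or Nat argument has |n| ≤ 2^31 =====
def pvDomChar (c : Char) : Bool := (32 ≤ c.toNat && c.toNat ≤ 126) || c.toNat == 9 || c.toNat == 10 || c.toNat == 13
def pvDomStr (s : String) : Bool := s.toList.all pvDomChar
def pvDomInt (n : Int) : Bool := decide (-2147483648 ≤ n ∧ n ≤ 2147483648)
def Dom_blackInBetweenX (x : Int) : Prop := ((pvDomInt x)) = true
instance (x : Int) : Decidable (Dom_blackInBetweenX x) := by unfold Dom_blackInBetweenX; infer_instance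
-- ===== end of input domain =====

-- B replaces A's leading-skip loop, lookahead branch and nested inner whiles with one
-- single-pass run detector over the row (objective: simpler).

-- the module-level global 'graph'
def pvGraph : List (List String) := [
  ["Y", "Y", "Y", "Y", "X", "Y", "Y"],
  ["Y", "2", "Y", "Y", "Y", "0", "Y"],
  ["1", "Y", "Y", "Y", "Y", "Y", "Y"],
  ["Y", "Y", "Y", "2", "Y", "Y", "Y"],
  ["Y", "Y", "Y", "Y", "Y", "Y", "2"],
  ["Y", "2", "Y", "Y", "Y", "3", "Y"],
  ["Y", "Y", "X", "Y", "Y", "Y", "Y"]]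

-- ===== PORT A =====
-- graph[x][y]: both indexings via pyGet? (Pre_ keeps x in range; y is always 0..6 here)
def pvCellA (x y : Int) : String :=
  (PySem.List.pyGet? ((PySem.List.pyGet? pvGraph x).getD []) y).getD ""

-- first while loop: skip leading non-'Y' cells, advancing startingPos and y together
def pvSkipA (x : Int) (fuel : Nat) (startingPos y : Int) : Int × Int :=
  match fuel with
  | 0 => (startingPos, y)
  | fuel + 1 =>
    if y < 7 then
      if pvCellA x y ≠ "Y" then pvSkipA x fuel (startingPos + 1) (y + 1)
      else (startingPos, y)
    else (startingPos, y)

-- innermost while loop of A: advance y over a block of non-'Y' cells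
def pvInnerA (x : Int) (fuel : Nat) (y : Int) : Int :=
  match fuel with
  | 0 => y
  | fuel + 1 =>
    if y < 7 ∧ pvCellA x y ≠ "Y" then pvInnerA x fuel (y + 1) else y

-- second while loop of A (fuel makes it total; y strictly increases each iteration)
def pvLoopA (x : Int) (fuel : Nat) (sectors : List (List Int)) (startingPos y : Int) :
    List (List Int) :=
  match fuel with
  | 0 => sectors
  | fuel + 1 =>
    if y < 7 then
      if pvCellA x y ≠ "Y" then
        let sectors := sectors ++ [[startingPos, y - 1]]
        if y + 1 < 7 ∧ pvCellA x (y + 1) = "Y" then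
          pvLoopA x fuel sectors (y + 1) (y + 1)
        else
          let y' := pvInnerA x 8 y
          pvLoopA x fuel sectors y' y'
      else if y = 7 - 1 ∧ pvCellA x y = "Y" then
        sectors ++ [[startingPos, y]]
      else
        pvLoopA x fuel sectors startingPos (y + 1)
    else sectors

def blackInBetweenX (x : Int) : List (List Int) :=
  let (startingPos, y) := pvSkipA x 8 0 0
  pvLoopA x 8 [] startingPos y

-- ===== PORT B =====
def pvCellB (x y : Int) : String :=
  (PySem.List.pyGet? ((PySem.List.pyGet? pvGraph x).getD []) y).getD ""

-- the for-loop over range(len(graph[0])) as a fold carrying (sectors, start)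
def pvStepB (x : Int) (st : List (List Int) × Option Int) (y : Int) :
    List (List Int) × Option Int :=
  if pvCellB x y = "Y" then
    match st.2 with
    | none => (st.1, some y)
    | some _ => st
  else
    match st.2 with
    | some s => (st.1 ++ [[s, y - 1]], none)
    | none => st

def blackInBetweenX_alt (x : Int) : List (List Int) :=
  let st := (PySem.List.pyRange 0 7 1).foldl (pvStepB x) ([], none)
  match st.2 with
  | some s => st.1 ++ [[s, 7 - 1]]
  | none => st.1

-- ===== PRECONDITION & SPEC =====
-- A raises IndexError unless x is a valid (possibly negative, Python-style) row index of graph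
def Pre_blackInBetweenX (x : Int) : Prop :=
  -(pvGraph.length : Int) ≤ x ∧ x < (pvGraph.length : Int)
instance (x : Int) : Decidable (Pre_blackInBetweenX x) := by
  unfold Pre_blackInBetweenX; infer_instance

def pvWitness_blackInBetweenX : Int := (2)

def Spec_blackInBetweenX (x : Int) (out : List (List Int)) : Prop := out = blackInBetweenX_alt x
instance (x : Int) (out : List (List Int)) : Decidable (Spec_blackInBetweenX x out) := by
  unfold Spec_blackInBetweenX; infer_instance

-- ===== CLAIM (what is proved, stated in full; the proofs are below) =====
def Claim_equal_blackInBetweenX : Prop :=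
  ∀ (x : Int), Dom_blackInBetweenX x → Pre_blackInBetweenX x →
    Spec_blackInBetweenX x (blackInBetweenX x)

-- ===== LEMMAS AND PROOFS =====

-- ===== VERDICT (by name: the statement is the Claim_ definition above) =====
theorem blackInBetweenX_spec : Claim_equal_blackInBetweenX := by
  intro x _ hpre
  unfold Pre_blackInBetweenX at hpre
  unfold Spec_blackInBetweenX
  have h1 : (-7 : Int) ≤ x := by simpa [pvGraph] using hpre.1
  have h2 : x < 7 := by simpa [pvGraph] using hpre.2
  interval_cases x <;> decide
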